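-- pv_equiv track=rewrite | github.com/ericelder/BackingTrack | SoloBuddy.py | step2notes
-- ===== SOURCE A (Python) =====
-- def step2notes(notes, mode):
--     """
--     Takes an int that sonic pi can play and converts it to the corresponding note string.
--     """
--     all_notes = ["C","C#/Db","D","D#/Eb","E","F","F#/Gb","G","G#/Ab","A","A#/Bb","B"]
--     pitches = []
--     for i in notes:
--             pitch = all_notes[i%12]
--             # This if statement makes the notes display as "C#" or "Db" rather than "C#/Db"
--             if len(pitch) == 1: # a natural note
--                 pitches.append(pitch)
--             elif mode == 'flats': # and not a natural note
--                 pitches.append(pitch[3:5])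
--             else: # mode == 'sharps' and not a natural note
--                 pitches.append(pitch[0:2])
--     return pitches
-- ===== SOURCE B (Python) =====
-- SHARPS = ["C","C#","D","D#","E","F","F#","G","G#","A","A#","B"]
-- FLATS  = ["C","Db","D","Eb","E","F","Gb","G","Ab","A","Bb","B"]
--
-- def step2notes(notes, mode):
--     table = FLATS if mode == 'flats' else SHARPS
--     return [table[i % 12] for i in notes]
-- ===== Notes on version B (the rewrite author's own statement) =====
-- stated objective: simpler
-- what changed: Replaces the per-element length/mode branching and runtime slicing of 'C#/Db'-style entries with two fully-resolved note tables selected once before a single map.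
import Mathlib
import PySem

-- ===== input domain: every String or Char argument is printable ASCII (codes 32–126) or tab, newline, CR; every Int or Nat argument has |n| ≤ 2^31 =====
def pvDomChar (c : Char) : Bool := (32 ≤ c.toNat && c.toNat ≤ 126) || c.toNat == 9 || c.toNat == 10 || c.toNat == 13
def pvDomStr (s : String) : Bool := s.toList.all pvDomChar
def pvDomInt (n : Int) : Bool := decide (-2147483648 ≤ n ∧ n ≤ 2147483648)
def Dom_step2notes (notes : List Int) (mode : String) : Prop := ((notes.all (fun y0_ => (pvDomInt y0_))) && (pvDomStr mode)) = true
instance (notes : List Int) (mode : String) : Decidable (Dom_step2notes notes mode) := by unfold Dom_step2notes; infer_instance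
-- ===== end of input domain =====

-- B replaces A's per-element length/mode branching and slicing of "C#/Db" entries
-- with two fully-resolved tables selected once before a single map (objective: simpler).

-- ===== PORT A =====
-- loop body of A (kept as a named helper; transliterates the body of A's for-loop)
def step2notesStep (mode : String) (pitches : List String) (i : Int) : List String :=
  let all_notes := ["C","C#/Db","D","D#/Eb","E","F","F#/Gb","G","G#/Ab","A","A#/Bb","B"]
  let pitch := PySem.List.pyGetD all_notes (PySem.Int.mod i 12) ""
  if PySem.Str.len pitch = 1 then pitches ++ [pitch]
  else if mode = "flats" then pitches ++ [PySem.Str.slice pitch (some 3) (some 5)]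
  else pitches ++ [PySem.Str.slice pitch (some 0) (some 2)]

def step2notes (notes : List Int) (mode : String) : List String :=
  notes.foldl (step2notesStep mode) []

-- ===== PORT B =====
def pvSharps : List String := ["C","C#","D","D#","E","F","F#","G","G#","A","A#","B"]
def pvFlats : List String := ["C","Db","D","Eb","E","F","Gb","G","Ab","A","Bb","B"]

def step2notes_alt (notes : List Int) (mode : String) : List String :=
  let table := if mode = "flats" then pvFlats else pvSharps
  notes.map (fun i => PySem.List.pyGetD table (PySem.Int.mod i 12) "")

-- ===== PRECONDITION & SPEC =====
def Spec_step2notes (notes : List Int) (mode : String) (out : List String) : Prop := out = step2notes_alt notes mode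
instance (notes : List Int) (mode : String) (out : List String) : Decidable (Spec_step2notes notes mode out) := by unfold Spec_step2notes; infer_instance

-- ===== CLAIM (what is proved, stated in full; the proofs are below) =====
def Claim_equal_step2notes : Prop := ∀ (notes : List Int) (mode : String), Dom_step2notes notes mode → Spec_step2notes notes mode (step2notes notes mode)

-- ===== LEMMAS AND PROOFS =====

-- A's loop body appends exactly B's table entry.
theorem step2notes_body (mode : String) (pitches : List String) (i : Int) :
    step2notesStep mode pitches i =
    pitches ++ [PySem.List.pyGetD (if mode = "flats" then pvFlats else pvSharps) (PySem.Int.mod i 12) ""] := by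
  unfold step2notesStep
  have h0 : 0 ≤ PySem.Int.mod i 12 := PySem.Int.mod_nonneg i (by norm_num)
  have h12 : PySem.Int.mod i 12 < 12 := PySem.Int.mod_lt i (by norm_num)
  set r := PySem.Int.mod i 12 with hr
  clear_value r
  by_cases hm : mode = "flats" <;> interval_cases r <;>
    simp [hm, pvFlats, pvSharps, PySem.List.pyGetD, PySem.List.pyGet?, PySem.List.pyIdx?,
          PySem.Str.len, PySem.Str.slice] <;> decide

theorem step2notes_fold (notes : List Int) (mode : String) (acc : List String) :
    notes.foldl (step2notesStep mode) acc =
    acc ++ notes.map (fun i => PySem.List.pyGetD (if mode = "flats" then pvFlats else pvSharps) (PySem.Int.mod i 12) "") := by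
  induction notes generalizing acc with
  | nil => simp
  | cons x xs ih =>
    simp only [List.foldl_cons, List.map_cons]
    rw [step2notes_body, ih]
    simp

-- ===== VERDICT (by name: the statement is the Claim_ definition above) =====
theorem step2notes_spec : Claim_equal_step2notes := by
  intro notes mode _
  unfold Spec_step2notes step2notes step2notes_alt
  simpa using step2notes_fold notes mode []
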